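-- pv_equiv track=rewrite | github.com/BudarinPavel/algorithms | yan_algorithm_training_1/1_G.py | count_details
-- ===== SOURCE A (Python) =====
-- def count_details(alloy_mass, billet_mass, workpiece_mass):
--     if alloy_mass < billet_mass or billet_mass < workpiece_mass:
--         return 0
--     else:
--         billet_cnt = alloy_mass // billet_mass
--         workpieces_cnt = billet_cnt * (billet_mass // workpiece_mass)
--         remain_alloy = alloy_mass % billet_mass + billet_cnt * (billet_mass % workpiece_mass)
--         return workpieces_cnt + count_details(remain_alloy, billet_mass, workpiece_mass)
-- ===== SOURCE B (Python) =====
-- def count_details(alloy_mass, billet_mass, workpiece_mass):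
--     if alloy_mass < billet_mass or billet_mass < workpiece_mass:
--         return 0
--     per_billet = billet_mass // workpiece_mass
--     scrap = billet_mass % workpiece_mass
--     if scrap <= 0:
--         # remelting a billet returns no (or non-positive) scrap: one round only
--         return (alloy_mass // billet_mass) * per_billet
--     # each billet effectively consumes billet_mass - scrap of alloy, and the
--     # process stops at the unique leftover in [scrap, billet_mass)
--     return ((alloy_mass - scrap) // (billet_mass - scrap)) * per_billet
-- ===== Notes on version B (the rewrite author's own statement) =====
-- stated objective: alternative
-- what changed: Replaces the round-by-round recursion by a closed form: when the per-billet scrap is non-positive a single round exhausts the alloy, otherwise each billet effectively consumes billet_mass - scrap of alloy and the total billet count is (alloy_mass - scrap) // (billet_mass - scrap), so the answer is computed with constant arithmetic instead of iterating rounds.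
import Mathlib
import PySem

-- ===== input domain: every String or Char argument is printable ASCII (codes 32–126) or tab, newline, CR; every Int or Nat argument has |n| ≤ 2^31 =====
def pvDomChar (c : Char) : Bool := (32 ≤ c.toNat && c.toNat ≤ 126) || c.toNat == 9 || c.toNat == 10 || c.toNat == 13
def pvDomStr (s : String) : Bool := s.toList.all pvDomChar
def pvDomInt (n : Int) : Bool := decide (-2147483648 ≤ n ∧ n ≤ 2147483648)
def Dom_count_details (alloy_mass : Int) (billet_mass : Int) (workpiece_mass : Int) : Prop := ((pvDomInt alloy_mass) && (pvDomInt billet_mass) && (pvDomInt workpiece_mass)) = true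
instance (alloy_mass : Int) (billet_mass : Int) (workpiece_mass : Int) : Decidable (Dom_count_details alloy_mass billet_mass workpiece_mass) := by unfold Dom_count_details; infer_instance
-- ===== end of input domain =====

-- B replaces A's round-by-round recursion with a closed form (each billet
-- effectively consumes billet_mass - scrap of alloy); same results, no iteration.

-- ===== PORT A =====
-- A's recursion, with a fuel counter that only makes it total in Lean; on every
-- input admitted by Pre_ the fuel alloy_mass.toNat + 1 is never exhausted
-- (each recursive call strictly decreases a nonnegative alloy mass).
def countDetailsRec (fuel : Nat) (alloy_mass : Int) (billet_mass : Int) (workpiece_mass : Int) : Int :=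
  match fuel with
  | 0 => 0
  | fuel + 1 =>
    if alloy_mass < billet_mass ∨ billet_mass < workpiece_mass then 0
    else
      let billet_cnt := PySem.Int.floordiv alloy_mass billet_mass
      let workpieces_cnt := billet_cnt * (PySem.Int.floordiv billet_mass workpiece_mass)
      let remain_alloy := PySem.Int.mod alloy_mass billet_mass + billet_cnt * (PySem.Int.mod billet_mass workpiece_mass)
      workpieces_cnt + countDetailsRec fuel remain_alloy billet_mass workpiece_mass

def count_details (alloy_mass : Int) (billet_mass : Int) (workpiece_mass : Int) : Int :=
  countDetailsRec (alloy_mass.toNat + 1) alloy_mass billet_mass workpiece_mass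

-- ===== PORT B =====
-- B's closed form, literal transcription of Source B.
def count_details_alt (alloy_mass : Int) (billet_mass : Int) (workpiece_mass : Int) : Int :=
  if alloy_mass < billet_mass ∨ billet_mass < workpiece_mass then 0
  else
    let per_billet := PySem.Int.floordiv billet_mass workpiece_mass
    let scrap := PySem.Int.mod billet_mass workpiece_mass
    if scrap ≤ 0 then (PySem.Int.floordiv alloy_mass billet_mass) * per_billet
    else (PySem.Int.floordiv (alloy_mass - scrap) (billet_mass - scrap)) * per_billet

-- ===== PRECONDITION & SPEC =====
-- Pre_ excludes only inputs on which the Python A never returns: entering the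
-- recursive branch (alloy_mass ≥ billet_mass ≥ workpiece_mass) with
-- workpiece_mass = 0 or billet_mass ≤ 0 gives ZeroDivisionError or unbounded
-- recursion (RecursionError).
def Pre_count_details (alloy_mass : Int) (billet_mass : Int) (workpiece_mass : Int) : Prop :=
  alloy_mass < billet_mass ∨ billet_mass < workpiece_mass ∨ (1 ≤ billet_mass ∧ workpiece_mass ≠ 0)
instance (alloy_mass : Int) (billet_mass : Int) (workpiece_mass : Int) : Decidable (Pre_count_details alloy_mass billet_mass workpiece_mass) := by unfold Pre_count_details; infer_instance

def pvWitness_count_details : Int × Int × Int := (100, 7, 3)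

def Spec_count_details (alloy_mass : Int) (billet_mass : Int) (workpiece_mass : Int) (out : Int) : Prop := out = count_details_alt alloy_mass billet_mass workpiece_mass
instance (alloy_mass : Int) (billet_mass : Int) (workpiece_mass : Int) (out : Int) : Decidable (Spec_count_details alloy_mass billet_mass workpiece_mass out) := by unfold Spec_count_details; infer_instance

-- ===== CLAIM (what is proved, stated in full; the proofs are below) =====
def Claim_equal_count_details : Prop := ∀ (alloy_mass : Int) (billet_mass : Int) (workpiece_mass : Int), Dom_count_details alloy_mass billet_mass workpiece_mass → Pre_count_details alloy_mass billet_mass workpiece_mass → Spec_count_details alloy_mass billet_mass workpiece_mass (count_details alloy_mass billet_mass workpiece_mass)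

-- ===== LEMMAS AND PROOFS =====

-- A's recursion returns 0 whenever the guard fires (any fuel).
theorem rec_zero_of_lt (fuel : Nat) (a b w : Int) (h : a < b) :
    countDetailsRec fuel a b w = 0 := by
  cases fuel with
  | zero => rfl
  | succ n => simp [countDetailsRec, h]

-- Floor division shifts by a multiple of the (positive) divisor.
theorem fdiv_sub_mul (x k m : Int) (hm : 0 < m) :
    PySem.Int.floordiv (x - k * m) m = PySem.Int.floordiv x m - k := by
  rw [PySem.Int.floordiv_eq_ediv_of_pos hm, PySem.Int.floordiv_eq_ediv_of_pos hm]
  have : x - k * m = x + (-k) * m := by ring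
  rw [this, Int.add_mul_ediv_right _ _ (by omega : m ≠ 0)]
  ring

-- A's recursion in the positive-scrap case equals the closed form, for any
-- sufficient fuel, by induction on fuel.
theorem rec_eq_closed (b w : Int) (hw : 0 < PySem.Int.mod b w) (hbw : w ≤ b) (hb : 1 ≤ b) (hw0 : w ≠ 0) :
    ∀ (fuel : Nat) (a : Int), PySem.Int.mod b w ≤ a → a.toNat < fuel →
      countDetailsRec fuel a b w =
        (PySem.Int.floordiv (a - PySem.Int.mod b w) (b - PySem.Int.mod b w)) * PySem.Int.floordiv b w := by
  have hwpos : 0 < w := by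
    rcases lt_trichotomy w 0 with h | h | h
    · have := PySem.Int.mod_neg_bounds b h
      omega
    · exact absurd h hw0
    · exact h
  have hrw : PySem.Int.mod b w < w := PySem.Int.mod_lt _ hwpos
  set r := PySem.Int.mod b w with hr
  have hbr : 0 < b - r := by omega
  intro fuel
  induction fuel with
  | zero => intro a _ hfa; omega
  | succ n ih =>
    intro a hra hfa
    by_cases hab : a < b
    · rw [rec_zero_of_lt]
      · have h0 : PySem.Int.floordiv (a - r) (b - r) = 0 := by
          rw [PySem.Int.floordiv_eq_iff_of_pos hbr]
          constructor <;> omega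
        rw [h0, zero_mul]
      · exact hab
    · have hba : b ≤ a := le_of_not_gt hab
      have hguard : ¬ (a < b ∨ b < w) := by omega
      simp only [countDetailsRec, if_neg hguard]
      set cnt := PySem.Int.floordiv a b with hcnt
      have hcnt1 : 1 ≤ cnt := by
        rw [hcnt, PySem.Int.le_floordiv_iff_mul_le hb]; omega
      have hmodab : cnt * b + PySem.Int.mod a b = a := PySem.Int.floordiv_mul_add_mod a b
      have hmab0 : 0 ≤ PySem.Int.mod a b := PySem.Int.mod_nonneg _ hb
      have hmabb : PySem.Int.mod a b < b := PySem.Int.mod_lt _ hb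
      have hrem : PySem.Int.mod a b + cnt * r = a - cnt * (b - r) := by
        have : PySem.Int.mod a b = a - cnt * b := by omega
        rw [this]; ring
      rw [hrem]
      have hremr : r ≤ a - cnt * (b - r) := by
        have h1 : r ≤ cnt * r := le_mul_of_one_le_left (le_of_lt hw) hcnt1
        omega
      have hremlt : a - cnt * (b - r) < a := by
        have h1 : b - r ≤ cnt * (b - r) := le_mul_of_one_le_left (le_of_lt hbr) hcnt1
        omega
      have hfn : (a - cnt * (b - r)).toNat < n := by omega
      rw [ih _ hremr hfn]
      have : a - cnt * (b - r) - r = (a - r) - cnt * (b - r) := by ring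
      rw [this, fdiv_sub_mul _ _ _ hbr]
      ring

-- ===== VERDICT (by name: the statement is the Claim_ definition above) =====
theorem count_details_spec : Claim_equal_count_details := by
  intro a b w _ hpre
  unfold Spec_count_details count_details count_details_alt
  by_cases hg : a < b ∨ b < w
  · rw [if_pos hg]
    simp only [countDetailsRec, if_pos hg]
  · rw [if_neg hg]
    have hba : b ≤ a := by omega
    have hwb : w ≤ b := by omega
    have hb : 1 ≤ b := by rcases hpre with h | h | h <;> omega
    have hw0 : w ≠ 0 := by
      rcases hpre with h | h | ⟨_, h⟩
      · omega
      · omega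
      · exact h
    set r := PySem.Int.mod b w with hr
    by_cases hrs : r ≤ 0
    · -- scrap ≤ 0: exactly one productive round
      rw [if_pos hrs]
      have hfa : 1 ≤ a.toNat := by omega
      have hguard : ¬ (a < b ∨ b < w) := by omega
      simp only [countDetailsRec, if_neg hguard]
      set cnt := PySem.Int.floordiv a b with hcnt
      have hcnt1 : 1 ≤ cnt := by
        rw [hcnt, PySem.Int.le_floordiv_iff_mul_le hb]; omega
      have hmabb : PySem.Int.mod a b < b := PySem.Int.mod_lt _ hb
      have hcr : cnt * r ≤ r := by nlinarith
      have hremlt : PySem.Int.mod a b + cnt * r < b := by omega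
      rw [rec_zero_of_lt _ _ _ _ hremlt, add_zero]
    · rw [if_neg hrs]
      have hrpos : 0 < r := by omega
      exact rec_eq_closed b w hrpos hwb hb hw0 _ a (by
        have hwpos : 0 < w := by
          rcases lt_trichotomy w 0 with h | h | h
          · have := PySem.Int.mod_neg_bounds b h
            omega
          · exact absurd h hw0
          · exact h
        have := PySem.Int.mod_lt b hwpos
        omega) (by omega)
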